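-- pv_equiv track=rewrite | github.com/xuefzhao/HGSV_SV_integration_pipe | scripts/step1.standardize_vcfs_to_bed.py | sv_hash_order
-- ===== SOURCE A (Python) =====
-- def sv_hash_order(sv_hash):
-- 	out={}
-- 	for k1 in sv_hash.keys():
-- 		out[k1]=[]
-- 		for k2 in sorted(sv_hash[k1].keys()):
-- 			for k3 in sorted(sv_hash[k1][k2].keys()):
-- 				for k4 in sorted(sv_hash[k1][k2][k3]):
-- 					out[k1].append(k4)
-- 	return out
-- ===== SOURCE B (Python) =====
-- def sv_hash_order(sv_hash):
--     # Depth-bounded recursion over the nested dict instead of a fixed four-level loop nest.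
--     def rec(node, depth):
--         if depth == 0:
--             return sorted(node)
--         flat = []
--         for k in sorted(node):
--             flat += rec(node[k], depth - 1)
--         return flat
--     return {k1: rec(sv_hash[k1], 2) for k1 in sv_hash}
-- ===== Notes on version B (the rewrite author's own statement) =====
-- stated objective: simpler
-- what changed: Replaces the fixed four-level loop nest that appends elements one by one into out[k1] with a depth-bounded recursive flattener rec(node, depth) concatenating whole sorted sub-results, and a dict comprehension at the top level.
import Mathlib
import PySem

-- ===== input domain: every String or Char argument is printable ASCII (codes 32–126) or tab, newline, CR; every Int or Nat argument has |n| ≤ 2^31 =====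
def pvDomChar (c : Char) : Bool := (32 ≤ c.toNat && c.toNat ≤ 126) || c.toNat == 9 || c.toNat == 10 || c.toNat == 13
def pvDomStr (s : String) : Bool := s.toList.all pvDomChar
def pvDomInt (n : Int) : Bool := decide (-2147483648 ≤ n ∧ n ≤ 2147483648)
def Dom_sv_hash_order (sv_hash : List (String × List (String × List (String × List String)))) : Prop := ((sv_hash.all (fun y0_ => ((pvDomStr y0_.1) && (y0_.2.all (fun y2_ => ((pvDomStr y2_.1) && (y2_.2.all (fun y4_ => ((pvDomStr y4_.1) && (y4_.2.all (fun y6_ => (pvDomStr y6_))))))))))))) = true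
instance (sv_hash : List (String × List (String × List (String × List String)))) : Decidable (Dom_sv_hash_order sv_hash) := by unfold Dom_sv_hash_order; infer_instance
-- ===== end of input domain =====

-- B flattens each top-level entry by a depth-bounded recursion over the nested dict (concatenating
-- whole sorted sub-results) instead of A's fixed four-level loop nest appending one element at a time.

-- ===== PORT A =====
def sv_hash_order (sv_hash : List (String × List (String × List (String × List String)))) : List (String × List String) :=
  let d : PySem.Dict String (List (String × List (String × List String))) := PySem.Dict.ofList sv_hash
  (d.keys.foldl (fun (out : PySem.Dict String (List String)) k1 =>
    let out := out.insert k1 []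
    (PySem.List.sorted (PySem.Dict.ofList (d.getD k1 [])).keys (fun x => x) false).foldl (fun out k2 =>
      (PySem.List.sorted (PySem.Dict.ofList ((PySem.Dict.ofList (d.getD k1 [])).getD k2 [])).keys (fun x => x) false).foldl (fun out k3 =>
        (PySem.List.sorted ((PySem.Dict.ofList ((PySem.Dict.ofList (d.getD k1 [])).getD k2 [])).getD k3 []) (fun x => x) false).foldl (fun out k4 =>
          out.modify k1 [] (fun l => l ++ [k4])) out) out) out) PySem.Dict.empty).items

-- ===== PORT B =====
-- rec(node, 0): the leaf list, sorted
def pvRec0 (node : List String) : List String :=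
  PySem.List.sorted node (fun x => x) false
-- rec(node, 1): flat concatenation of rec0 of the values, in sorted key order
def pvRec1 (node : List (String × List String)) : List String :=
  let d := PySem.Dict.ofList node
  (PySem.List.sorted d.keys (fun x => x) false).foldl (fun flat k => flat ++ pvRec0 (d.getD k [])) []
-- rec(node, 2): flat concatenation of rec1 of the values, in sorted key order
def pvRec2 (node : List (String × List (String × List String))) : List String :=
  let d := PySem.Dict.ofList node
  (PySem.List.sorted d.keys (fun x => x) false).foldl (fun flat k => flat ++ pvRec1 (d.getD k [])) []
def sv_hash_order_alt (sv_hash : List (String × List (String × List (String × List String)))) : List (String × List String) :=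
  let d : PySem.Dict String (List (String × List (String × List String))) := PySem.Dict.ofList sv_hash
  (d.keys.foldl (fun (out : PySem.Dict String (List String)) k1 =>
    out.insert k1 (pvRec2 (d.getD k1 []))) PySem.Dict.empty).items

-- ===== PRECONDITION & SPEC =====
def Spec_sv_hash_order (sv_hash : List (String × List (String × List (String × List String)))) (out : List (String × List String)) : Prop := out = sv_hash_order_alt sv_hash
instance (sv_hash : List (String × List (String × List (String × List String)))) (out : List (String × List String)) : Decidable (Spec_sv_hash_order sv_hash out) := by unfold Spec_sv_hash_order; infer_instance

-- ===== CLAIM (what is proved, stated in full; the proofs are below) =====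
def Claim_equal_sv_hash_order : Prop := ∀ (sv_hash : List (String × List (String × List (String × List String)))), Dom_sv_hash_order sv_hash → Spec_sv_hash_order sv_hash (sv_hash_order sv_hash)

-- ===== LEMMAS AND PROOFS =====

-- re-inserting at the same key overwrites in place
theorem pv_ins_ins {κ ν : Type} [BEq κ] [LawfulBEq κ] (d : PySem.Dict κ ν) (k : κ) (v w : ν) :
    (d.insert k v).insert k w = d.insert k w := by
  apply PySem.Dict.ext
  by_cases h : (d.items.any fun p => p.1 == k) = true
  · have h2 : (((PySem.Dict.insert d k v)).items.any fun p => p.1 == k) = true := by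
      simp only [PySem.Dict.insert, PySem.Dict.contains, h, if_true]
      rcases List.any_eq_true.mp h with ⟨p, hp, hpk⟩
      exact List.any_eq_true.mpr ⟨(k, v), List.mem_map.mpr ⟨p, hp, by simp [hpk]⟩, by simp⟩
    simp only [PySem.Dict.insert, PySem.Dict.contains, h, if_true] at h2 ⊢
    simp only [h2, if_true, List.map_map]
    apply List.map_congr_left
    intro p _
    by_cases hk : (p.1 == k) = true <;> simp [hk]
  · have h2 : (((PySem.Dict.insert d k v)).items.any fun p => p.1 == k) = true := by
      simp only [PySem.Dict.insert, PySem.Dict.contains, h]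
      exact List.any_eq_true.mpr ⟨(k, v), by simp, by simp⟩
    simp only [PySem.Dict.insert, PySem.Dict.contains, h] at h2 ⊢
    simp only [h2, if_true]
    have hid : ∀ p ∈ d.items, (fun p : κ × ν => if (p.1 == k) = true then (k, w) else p) p = p := by
      intro p hp
      have hpk : (p.1 == k) = false := by
        by_contra hc
        exact h (List.any_eq_true.mpr ⟨p, hp, by simpa using hc⟩)
      simp [hpk]
    simp [List.map_congr_left hid]

theorem pv_modify_insert {κ ν : Type} [BEq κ] [LawfulBEq κ] (d : PySem.Dict κ ν) (k : κ) (v dflt : ν) (f : ν → ν) :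
    (d.insert k v).modify k dflt f = d.insert k (f v) := by
  rw [PySem.Dict.modify, PySem.Dict.getD_insert_self, pv_ins_ins]

-- level 0: appending the elements of ys one by one into key k
theorem pv_foldl0 (k : String) (ys : List String) :
    ∀ (d : PySem.Dict String (List String)) (v : List String),
      ys.foldl (fun o y => o.modify k [] (fun l => l ++ [y])) (d.insert k v) = d.insert k (v ++ ys) := by
  induction ys with
  | nil => intro d v; simp
  | cons y ys ih =>
      intro d v
      simp only [List.foldl_cons, pv_modify_insert]
      rw [ih d (v ++ [y])]
      simp

-- level ≥ 1: a fold whose body appends (by level-0-style folds) the block s b for each b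
theorem pv_foldl1 (k : String) {β : Type} (s : β → List String) (ks : List β) :
    ∀ (d : PySem.Dict String (List String)) (v : List String),
      ks.foldl (fun o b => (s b).foldl (fun o y => o.modify k [] (fun l => l ++ [y])) o) (d.insert k v)
        = d.insert k (v ++ ks.flatMap s) := by
  induction ks with
  | nil => intro d v; simp
  | cons b ks ih =>
      intro d v
      simp only [List.foldl_cons]
      rw [pv_foldl0 k (s b) d v, ih d (v ++ s b)]
      simp

theorem pv_foldl2 (k : String) {β γ : Type} (ks : List β) (t : β → List γ) (s : β → γ → List String) :
    ∀ (d : PySem.Dict String (List String)) (v : List String),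
      ks.foldl (fun o b => (t b).foldl (fun o c => (s b c).foldl (fun o y => o.modify k [] (fun l => l ++ [y])) o) o) (d.insert k v)
        = d.insert k (v ++ ks.flatMap (fun b => (t b).flatMap (s b))) := by
  induction ks with
  | nil => intro d v; simp
  | cons b ks ih =>
      intro d v
      simp only [List.foldl_cons]
      rw [pv_foldl1 k (s b) (t b) d v, ih d (v ++ (t b).flatMap (s b))]
      simp

theorem pv_foldl_ext {α β : Type} (f g : α → β → α) (h : ∀ a b, f a b = g a b) :
    ∀ (l : List β) (a : α), l.foldl f a = l.foldl g a := by
  intro l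
  induction l with
  | nil => intro a; rfl
  | cons b l ih => intro a; simp only [List.foldl_cons, h]; exact ih _

theorem pvRec1_eq (node : List (String × List String)) :
    pvRec1 node = (PySem.List.sorted (PySem.Dict.ofList node).keys (fun x => x) false).flatMap
      (fun k => pvRec0 ((PySem.Dict.ofList node).getD k [])) := by
  simp [pvRec1, List.flatMap_def]

theorem pvRec2_eq (node : List (String × List (String × List String))) :
    pvRec2 node = (PySem.List.sorted (PySem.Dict.ofList node).keys (fun x => x) false).flatMap
      (fun k => pvRec1 ((PySem.Dict.ofList node).getD k [])) := by
  simp [pvRec2, List.flatMap_def]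

-- ===== VERDICT (by name: the statement is the Claim_ definition above) =====
theorem sv_hash_order_spec : Claim_equal_sv_hash_order := by
  intro sv_hash _
  unfold Spec_sv_hash_order sv_hash_order sv_hash_order_alt
  dsimp only
  congr 1
  apply pv_foldl_ext
  intro out k1
  rw [pv_foldl2 k1]
  congr 1
  rw [pvRec2_eq]
  simp only [List.nil_append]
  apply List.flatMap_congr
  intro k2 _
  rw [pvRec1_eq]
  apply List.flatMap_congr
  intro k3 _
  rfl
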